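-- pv_equiv track=rewrite | github.com/Shreyasvprasad/DSA | countzerosubarray.py | count_subarrays_with_sum_zero
-- ===== SOURCE A (Python) =====
-- def count_subarrays_with_sum_zero(arr):
--     n = len(arr)
--     prefix_sum = 0
--     prefix_sum_count = {}  # Hash map to store prefix sum frequencies
--     count = 0  # Count of sub-arrays with sum 0
--
--     for i in range(n):
--         prefix_sum += arr[i]
--
--         if prefix_sum == 0:
--             count += 1
--
--         if prefix_sum in prefix_sum_count:
--             count += prefix_sum_count[prefix_sum]
--             prefix_sum_count[prefix_sum] += 1
--         else:
--             prefix_sum_count[prefix_sum] = 1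
--
--     return count
-- ===== SOURCE B (Python) =====
-- def count_subarrays_with_sum_zero(arr):
--     # Sort all prefix sums (including the empty prefix 0); equal sums become
--     # adjacent runs, and a run of length c contributes c*(c-1)//2 subarrays.
--     ps = [0]
--     s = 0
--     for x in arr:
--         s += x
--         ps.append(s)
--     ps.sort()
--     total = 0
--     run = 1
--     for i in range(1, len(ps)):
--         if ps[i] == ps[i - 1]:
--             run += 1
--         else:
--             total += run * (run - 1) // 2
--             run = 1
--     return total + run * (run - 1) // 2
-- ===== Notes on version B (the rewrite author's own statement) =====
-- stated objective: alternative
-- what changed: Replaces A's hash-map online pair counting by a dictionary-free sort-then-scan: build the list of all prefix sums (seeded with 0), sort it, then scan adjacent runs of equal values adding c*(c-1)//2 per run.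
import Mathlib
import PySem

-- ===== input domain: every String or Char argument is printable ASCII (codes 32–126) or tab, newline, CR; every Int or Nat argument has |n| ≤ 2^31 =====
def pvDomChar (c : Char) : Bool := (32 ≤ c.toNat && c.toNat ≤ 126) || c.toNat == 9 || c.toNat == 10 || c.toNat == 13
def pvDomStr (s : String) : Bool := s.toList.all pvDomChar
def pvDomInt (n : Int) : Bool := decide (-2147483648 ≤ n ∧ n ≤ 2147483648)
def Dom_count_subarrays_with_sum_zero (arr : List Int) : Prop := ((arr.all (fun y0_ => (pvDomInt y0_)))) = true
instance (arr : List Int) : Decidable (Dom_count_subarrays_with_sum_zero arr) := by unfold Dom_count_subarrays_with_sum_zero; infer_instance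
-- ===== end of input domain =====

-- B replaces A's hash-map online pair counting by a dictionary-free sort-then-scan:
-- collect all prefix sums (seeded with 0), sort them, and add c*(c-1)//2 for each
-- run of c equal adjacent values (objective: alternative).

-- ===== PORT A =====
-- loop body of A's for-loop (x = arr[i]); state = (prefix_sum, prefix_sum_count, count)
def pvAStep (st : Int × PySem.Dict Int Int × Int) (x : Int) : Int × PySem.Dict Int Int × Int :=
  let prefix_sum := st.1 + x
  let count := if prefix_sum = 0 then st.2.2 + 1 else st.2.2
  if (st.2.1).contains prefix_sum then
    (prefix_sum, (st.2.1).insert prefix_sum ((st.2.1).getD prefix_sum 0 + 1), count + (st.2.1).getD prefix_sum 0)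
  else
    (prefix_sum, (st.2.1).insert prefix_sum 1, count)

def count_subarrays_with_sum_zero (arr : List Int) : Int :=
  let n := PySem.List.len arr
  ((PySem.List.pyRange 0 n 1).foldl
      (fun st i => pvAStep st (PySem.List.pyGetD arr i 0))
      (0, PySem.Dict.empty, 0)).2.2

-- ===== PORT B =====
-- loop body of B's scan over sorted prefix sums; state = (prev = ps[i-1], run, total)
def pvBStep (st : Int × Int × Int) (x : Int) : Int × Int × Int :=
  if x = st.1 then (x, st.2.1 + 1, st.2.2)
  else (x, 1, st.2.2 + PySem.Int.floordiv (st.2.1 * (st.2.1 - 1)) 2)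

-- the scan of B's second loop, applied to the sorted prefix-sum list
def pvRunTotal (sps : List Int) : Int :=
  match sps with
  | [] => 0        -- unreachable in B: ps starts as [0], so it is never empty
  | h :: t =>
      let st := t.foldl pvBStep (h, 1, 0)
      st.2.2 + PySem.Int.floordiv (st.2.1 * (st.2.1 - 1)) 2

def count_subarrays_with_sum_zero_alt (arr : List Int) : Int :=
  let ps := (arr.foldl (fun (p : List Int × Int) x =>
      let s := p.2 + x
      (p.1 ++ [s], s)) ([(0 : Int)], 0)).1
  pvRunTotal (PySem.List.sorted ps (fun x => x) false)

-- ===== PRECONDITION & SPEC =====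
def Spec_count_subarrays_with_sum_zero (arr : List Int) (out : Int) : Prop := out = count_subarrays_with_sum_zero_alt arr
instance (arr : List Int) (out : Int) : Decidable (Spec_count_subarrays_with_sum_zero arr out) := by unfold Spec_count_subarrays_with_sum_zero; infer_instance

-- ===== CLAIM (what is proved, stated in full; the proofs are below) =====
def Claim_equal_count_subarrays_with_sum_zero : Prop := ∀ (arr : List Int), Dom_count_subarrays_with_sum_zero arr → Spec_count_subarrays_with_sum_zero arr (count_subarrays_with_sum_zero arr)

-- ===== LEMMAS AND PROOFS =====

-- prefix sums of arr starting from running sum s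
def pvPsums : Int → List Int → List Int
  | _, [] => []
  | s, x :: t => (s + x) :: pvPsums (s + x) t

-- c*(c-1)//2
def pvG (c : Int) : Int := PySem.Int.floordiv (c * (c - 1)) 2

-- online pair count: for each q in Q (in order), how often q occurred in the history M so far
def pvOnl : List Int → List Int → Int
  | [], _ => 0
  | q :: Q, M => ((M.count q : Int)) + pvOnl Q (M ++ [q])

-- the common yardstick: sum of C(c,2) over the multiplicities c of the multiset M
def pvSSum (M : List Int) : Int :=
  ((PySem.Set.ofList M).map (fun k => pvG ((M.count k : Int)))).sum

-- simplified form of A's loop body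
def pvAStep' (st : Int × PySem.Dict Int Int × Int) (x : Int) : Int × PySem.Dict Int Int × Int :=
  let s := st.1 + x
  (s, (st.2.1).insert s ((st.2.1).getD s 0 + 1),
   st.2.2 + (if s = 0 then 1 else 0) + (st.2.1).getD s 0)

lemma pvAStep_eq (st : Int × PySem.Dict Int Int × Int) (x : Int) : pvAStep st x = pvAStep' st x := by
  unfold pvAStep pvAStep'
  by_cases hc : (st.2.1).contains (st.1 + x) = true
  · simp only [hc, if_true]
    by_cases h0 : st.1 + x = 0 <;> simp [h0]
  · have hg : (st.2.1).getD (st.1 + x) 0 = 0 :=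
      PySem.Dict.getD_of_not_contains _ _ (by simpa using hc)
    simp only [hc, hg]
    by_cases h0 : st.1 + x = 0 <;> simp [h0]

lemma pvG_succ (c : Int) : pvG (c + 1) = pvG c + c := by
  unfold pvG
  rw [PySem.Int.floordiv_eq_ediv_of_pos (by norm_num), PySem.Int.floordiv_eq_ediv_of_pos (by norm_num)]
  have h : (c + 1) * (c + 1 - 1) = c * (c - 1) + 2 * c := by ring
  rw [h]
  generalize c * (c - 1) = a
  omega

lemma pv_sum_update (q : Int) (f f' : Int → Int) :
    ∀ ks : List Int, ks.Nodup → q ∈ ks → (∀ k, k ≠ q → f' k = f k) →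
      (ks.map f').sum = (ks.map f).sum + (f' q - f q) := by
  intro ks
  induction ks with
  | nil => intro _ hq _; simp at hq
  | cons a t ih =>
    intro hnd hq h
    by_cases haq : a = q
    · subst haq
      have hqt : a ∉ t := (List.nodup_cons.mp hnd).1
      have : t.map f' = t.map f := by
        apply List.map_congr_left
        intro k hk
        exact h k (fun he => hqt (he ▸ hk))
      simp [this]; ring
    · have hqt : q ∈ t := by
        rcases List.mem_cons.mp hq with h1 | h1
        · exact absurd h1.symm haq
        · exact h1
      have := ih (List.nodup_cons.mp hnd).2 hqt h
      simp [this, h a haq]; ring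

lemma pv_counter_append (L Q : List Int) :
    Q.foldl (fun d q => d.insert q (d.getD q 0 + 1)) (PySem.Dict.counter L) = PySem.Dict.counter (L ++ Q) := by
  rw [← PySem.Dict.foldl_insert_getD_add_one_eq_counter, ← PySem.Dict.foldl_insert_getD_add_one_eq_counter,
    List.foldl_append]

lemma pv_counter_snoc (L : List Int) (x : Int) :
    (PySem.Dict.counter L).insert x ((PySem.Dict.counter L).getD x 0 + 1) = PySem.Dict.counter (L ++ [x]) := by
  rw [← pv_counter_append]
  rfl

lemma pv_SSum_snoc (M : List Int) (q : Int) : pvSSum (M ++ [q]) = pvSSum M + (M.count q : Int) := by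
  have hset : PySem.Set.ofList (M ++ [q]) = PySem.Set.add (PySem.Set.ofList M) q := by
    rw [PySem.Set.ofList_eq_foldl, PySem.Set.ofList_eq_foldl, List.foldl_append]
    rfl
  have hcount : ∀ k : Int, (M ++ [q]).count k = M.count k + if q = k then 1 else 0 := by
    intro k
    simp [List.count_append, List.count_cons]
  by_cases hq : q ∈ M
  · have hadd : PySem.Set.add (PySem.Set.ofList M) q = PySem.Set.ofList M := by
      simp [PySem.Set.add, PySem.Set.contains, (PySem.Set.mem_ofList M q).mpr hq]
    rw [pvSSum, hset, hadd]
    have := pv_sum_update q (fun k => pvG ((M.count k : Int)))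
      (fun k => pvG (((M ++ [q]).count k : Int))) (PySem.Set.ofList M)
      (PySem.Set.nodup_ofList M) ((PySem.Set.mem_ofList M q).mpr hq)
      (by
        intro k hk
        have hqk : ¬ q = k := fun h => hk h.symm
        show pvG (((M ++ [q]).count k : Int)) = pvG ((M.count k : Int))
        rw [hcount k]
        simp [hqk])
    rw [this]
    have hqq : (((M ++ [q]).count q : Int)) = (M.count q : Int) + 1 := by
      rw [hcount q]; simp
    simp only [hqq, pvG_succ]
    unfold pvSSum
    ring
  · have hadd : PySem.Set.add (PySem.Set.ofList M) q = PySem.Set.ofList M ++ [q] := by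
      have hnm : q ∉ PySem.Set.ofList M := fun h => hq ((PySem.Set.mem_ofList M q).mp h)
      simp [PySem.Set.add, PySem.Set.contains, hnm]
    have hcz : M.count q = 0 := List.count_eq_zero.mpr hq
    rw [pvSSum, hset, hadd, List.map_append, List.sum_append]
    have h1 : (PySem.Set.ofList M).map (fun k => pvG (((M ++ [q]).count k : Int)))
        = (PySem.Set.ofList M).map (fun k => pvG ((M.count k : Int))) := by
      apply List.map_congr_left
      intro k hk
      have hkq : q ≠ k := fun h => hq (h ▸ (PySem.Set.mem_ofList M k).mp hk)
      simp [hcount k, hkq]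
    have h2 : pvG (((M ++ [q]).count q : Int)) = 0 := by
      rw [hcount q]; simp [hcz, pvG]
    rw [h1]
    have hg1 : pvG 1 = 0 := by decide
    simp [hcz, hg1, pvSSum]

lemma pv_onl_SSum : ∀ (Q M : List Int), pvOnl Q M + pvSSum M = pvSSum (M ++ Q) := by
  intro Q
  induction Q with
  | nil => intro M; simp [pvOnl]
  | cons q Q ih =>
    intro M
    have h1 := pv_SSum_snoc M q
    have h2 := ih (M ++ [q])
    have h3 : M ++ q :: Q = (M ++ [q]) ++ Q := by simp
    rw [pvOnl, h3, ← h2]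
    omega

lemma pv_LA : ∀ (arr : List Int) (s c : Int) (L : List Int),
    (arr.foldl pvAStep' (s, PySem.Dict.counter L, c)).2.2
      = c + pvOnl (pvPsums s arr) ((0 : Int) :: L) := by
  intro arr
  induction arr with
  | nil => intro s c L; simp [pvPsums, pvOnl]
  | cons x t ih =>
    intro s c L
    have hstep : pvAStep' (s, PySem.Dict.counter L, c) x
        = (s + x, PySem.Dict.counter (L ++ [s + x]),
           c + (if s + x = 0 then 1 else 0) + (L.count (s + x) : Int)) := by
      show (s + x, (PySem.Dict.counter L).insert (s + x) ((PySem.Dict.counter L).getD (s + x) 0 + 1),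
            c + (if s + x = 0 then 1 else 0) + (PySem.Dict.counter L).getD (s + x) 0) = _
      rw [pv_counter_snoc, PySem.Dict.getD_counter]
    rw [List.foldl_cons, hstep, ih]
    have hc : (((0 : Int) :: L).count (s + x) : Int)
        = (if s + x = 0 then 1 else 0) + (L.count (s + x) : Int) := by
      by_cases h0 : s + x = 0
      · simp [h0]; ring
      · have h0' : ¬ ((0 : Int) = s + x) := fun h => h0 h.symm
        simp [h0, h0']
    have hl : ((0 : Int) :: L) ++ [s + x] = (0 : Int) :: (L ++ [s + x]) := by simp
    rw [pvPsums, pvOnl, hc, ← hl]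
    ring

lemma pv_A_char (arr : List Int) :
    count_subarrays_with_sum_zero arr = pvOnl (pvPsums 0 arr) [0] := by
  show (List.foldl (fun st i => pvAStep st (PySem.List.pyGetD arr i 0))
      (0, PySem.Dict.empty, 0) (PySem.List.pyRange 0 (PySem.List.len arr) 1)).2.2 = _
  rw [PySem.List.foldl_pyRange_pyGetD arr 0 pvAStep (0, PySem.Dict.empty, 0) (le_refl 0)]
  simp only [Int.toNat_zero, List.drop_zero]
  have hfun : pvAStep = pvAStep' := funext fun st => funext fun x => pvAStep_eq st x
  rw [hfun]
  have : (PySem.Dict.empty : PySem.Dict Int Int) = PySem.Dict.counter ([] : List Int) := rfl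
  rw [this, pv_LA]
  simp

-- pvSSum depends only on the multiset of M
lemma pv_SSum_perm {M M' : List Int} (h : M.Perm M') : pvSSum M = pvSSum M' := by
  have hcnt : ∀ k : Int, M.count k = M'.count k := fun k => h.count_eq k
  have hmem : ∀ a : Int, a ∈ PySem.Set.ofList M ↔ a ∈ PySem.Set.ofList M' := by
    intro a
    rw [PySem.Set.mem_ofList, PySem.Set.mem_ofList]
    exact ⟨fun hm => h.mem_iff.mp hm, fun hm => h.mem_iff.mpr hm⟩
  have hperm : (PySem.Set.ofList M).Perm (PySem.Set.ofList M') :=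
    (List.perm_ext_iff_of_nodup (PySem.Set.nodup_ofList M) (PySem.Set.nodup_ofList M')).mpr hmem
  unfold pvSSum
  have hmap : (PySem.Set.ofList M').map (fun k => pvG ((M.count k : Int)))
      = (PySem.Set.ofList M').map (fun k => pvG ((M'.count k : Int))) := by
    apply List.map_congr_left
    intro k _
    rw [hcnt k]
  rw [← hmap]
  exact (hperm.map _).sum_eq

-- appending n fresh copies of p adds C(n,2) pairs
lemma pv_SSum_rep (p : Int) (L : List Int) (hp : p ∉ L) :
    ∀ n : Nat, pvSSum (L ++ List.replicate n p) = pvSSum L + pvG (n : Int) := by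
  intro n
  induction n with
  | zero => simp [pvG]
  | succ n ih =>
    have h1 : L ++ List.replicate (n + 1) p = (L ++ List.replicate n p) ++ [p] := by
      simp [List.replicate_succ']
    have hcnt : (L ++ List.replicate n p).count p = n := by
      simp [List.count_append, List.count_eq_zero.mpr hp]
    rw [h1, pv_SSum_snoc, ih, hcnt]
    push_cast
    rw [pvG_succ]
    ring

-- the run scan over a sorted tail computes pvSSum of (run copies of prev) ++ t
lemma pv_scan : ∀ (t : List Int) (prev total : Int) (k : Nat),
    t.Pairwise (· ≤ ·) → (∀ y ∈ t, prev ≤ y) →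
    (t.foldl pvBStep (prev, ((k : Int) + 1), total)).2.2
        + pvG (t.foldl pvBStep (prev, ((k : Int) + 1), total)).2.1
      = total + pvSSum (List.replicate (k + 1) prev ++ t) := by
  intro t
  induction t with
  | nil =>
    intro prev total k _ _
    have := pv_SSum_rep prev [] (by simp) (k + 1)
    simp only [List.nil_append] at this
    simp only [List.foldl_nil, List.append_nil]
    rw [this]
    have h0 : pvSSum [] = 0 := rfl
    rw [h0]
    push_cast
    ring
  | cons x t ih =>
    intro prev total k hP hall
    have hPt : t.Pairwise (· ≤ ·) := (List.pairwise_cons.mp hP).2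
    have hxt : ∀ y ∈ t, x ≤ y := (List.pairwise_cons.mp hP).1
    have hpx : prev ≤ x := hall x (List.mem_cons_self)
    rw [List.foldl_cons]
    by_cases hx : x = prev
    · have hstep : pvBStep (prev, ((k : Int) + 1), total) x
          = (x, ((k + 1 : Nat) : Int) + 1, total) := by
        simp [pvBStep, hx]
      rw [hstep, ih x total (k + 1) hPt hxt]
      have hlist : List.replicate (k + 1) prev ++ x :: t
          = List.replicate (k + 1 + 1) x ++ t := by
        subst hx
        simp [List.replicate_succ']
      rw [hlist]
    · have hstep : pvBStep (prev, ((k : Int) + 1), total) x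
          = (x, ((0 : Nat) : Int) + 1, total + pvG ((k : Int) + 1)) := by
        simp [pvBStep, hx, pvG]
      rw [hstep, ih x (total + pvG ((k : Int) + 1)) 0 hPt hxt]
      have hnm : prev ∉ x :: t := by
        intro hm
        rcases List.mem_cons.mp hm with h1 | h1
        · exact hx h1.symm
        · have := hxt prev h1
          have hlt : prev < x := lt_of_le_of_ne hpx (fun h => hx h.symm)
          omega
      have hperm : (List.replicate (k + 1) prev ++ x :: t).Perm ((x :: t) ++ List.replicate (k + 1) prev) :=
        List.perm_append_comm
      rw [pv_SSum_perm hperm, pv_SSum_rep prev (x :: t) hnm (k + 1)]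
      have : ((k + 1 : Nat) : Int) = (k : Int) + 1 := by push_cast; ring
      rw [this]
      simp
      ring

-- the prefix-sum builder of B produces acc ++ pvPsums s arr
lemma pv_build : ∀ (arr : List Int) (acc : List Int) (s : Int),
    (arr.foldl (fun (p : List Int × Int) x =>
        let s := p.2 + x
        (p.1 ++ [s], s)) (acc, s)).1 = acc ++ pvPsums s arr := by
  intro arr
  induction arr with
  | nil => intro acc s; simp [pvPsums]
  | cons x t ih =>
    intro acc s
    rw [List.foldl_cons, pvPsums]
    show (t.foldl _ (acc ++ [s + x], s + x)).1 = _
    rw [ih (acc ++ [s + x]) (s + x)]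
    simp

lemma pv_B_char (arr : List Int) :
    count_subarrays_with_sum_zero_alt arr = pvSSum ((0 : Int) :: pvPsums 0 arr) := by
  unfold count_subarrays_with_sum_zero_alt
  rw [pv_build arr [(0 : Int)] 0]
  have hps : [(0 : Int)] ++ pvPsums 0 arr = (0 : Int) :: pvPsums 0 arr := by simp
  rw [hps]
  set ps := (0 : Int) :: pvPsums 0 arr with hpsdef
  show pvRunTotal (PySem.List.sorted ps (fun x => x) false) = pvSSum ps
  have hperm : (PySem.List.sorted ps (fun x => x) false).Perm ps := PySem.List.sorted_perm ps _ _
  have hne : PySem.List.sorted ps (fun x => x) false ≠ [] := by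
    intro h
    have : ps = [] := by
      have := hperm.length_eq
      rw [h] at this
      exact List.length_eq_zero_iff.mp this.symm
    simp [hpsdef] at this
  obtain ⟨h, t, hS⟩ := List.exists_cons_of_ne_nil hne
  rw [hS]
  show pvRunTotal (h :: t) = pvSSum ps
  have hPW : (h :: t).Pairwise (· ≤ ·) := by
    have := PySem.List.sorted_pairwise ps (fun x => x)
    rw [hS] at this
    exact this
  have hPt : t.Pairwise (· ≤ ·) := (List.pairwise_cons.mp hPW).2
  have hht : ∀ y ∈ t, h ≤ y := (List.pairwise_cons.mp hPW).1
  have hscan := pv_scan t h 0 0 hPt hht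
  simp only [Nat.cast_zero, zero_add] at hscan
  show (t.foldl pvBStep (h, 1, 0)).2.2
      + PySem.Int.floordiv ((t.foldl pvBStep (h, 1, 0)).2.1 * ((t.foldl pvBStep (h, 1, 0)).2.1 - 1)) 2 = _
  have hG : PySem.Int.floordiv ((t.foldl pvBStep (h, 1, 0)).2.1 * ((t.foldl pvBStep (h, 1, 0)).2.1 - 1)) 2
      = pvG (t.foldl pvBStep (h, 1, 0)).2.1 := rfl
  rw [hG, hscan]
  have hrep : List.replicate (0 + 1) h ++ t = h :: t := by simp
  rw [hrep]
  have hperm2 : (h :: t).Perm ps := hS ▸ hperm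
  rw [pv_SSum_perm hperm2]

-- ===== VERDICT (by name: the statement is the Claim_ definition above) =====
theorem count_subarrays_with_sum_zero_spec : Claim_equal_count_subarrays_with_sum_zero := by
  intro arr _
  unfold Spec_count_subarrays_with_sum_zero
  rw [pv_A_char, pv_B_char]
  have h := pv_onl_SSum (pvPsums 0 arr) [0]
  have h0 : pvSSum [(0 : Int)] = 0 := by decide
  have hM : [(0 : Int)] ++ pvPsums 0 arr = (0 : Int) :: pvPsums 0 arr := by simp
  rw [hM] at h
  omega
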